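-- pv_equiv track=rewrite | github.com/GuidoM197/TPS-Algo-1 | TP1/primera_entrega_cuatro_en_linea.py | diagonales_inferior_invertidas
-- ===== SOURCE A (Python) =====
-- def diagonales_inferior_invertidas(tablero, list_diagonales):
--
--     for col in range(len(tablero[0])-1, -1, -1):
--         diagonales = []
--         filas = 0
--         columnas = col
--
--         while filas < len(tablero) and columnas >= 0 and columnas < len(tablero[0]):
--             diagonales.append(tablero[filas][columnas])
--             filas += 1
--             columnas += 1
--         list_diagonales.append(diagonales)
--
--     return list_diagonales
-- ===== SOURCE B (Python) =====
-- def diagonales_inferior_invertidas(tablero, list_diagonales):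
--     m = len(tablero[0])
--     buckets = [[] for _ in range(m)]
--     for i, fila in enumerate(tablero):
--         for j in range(i, m):
--             buckets[j - i].append(fila[j])
--     list_diagonales.extend(reversed(buckets))
--     return list_diagonales
-- ===== Notes on version B (the rewrite author's own statement) =====
-- stated objective: alternative
-- what changed: Replaces A's per-column walks (one while loop per diagonal, moving a (filas, columnas) cursor down-right) by a single row-major pass that scatters each cell with j >= i into a bucket keyed by diagonal index j - i, then emits the buckets in descending key order.
import Mathlib
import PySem

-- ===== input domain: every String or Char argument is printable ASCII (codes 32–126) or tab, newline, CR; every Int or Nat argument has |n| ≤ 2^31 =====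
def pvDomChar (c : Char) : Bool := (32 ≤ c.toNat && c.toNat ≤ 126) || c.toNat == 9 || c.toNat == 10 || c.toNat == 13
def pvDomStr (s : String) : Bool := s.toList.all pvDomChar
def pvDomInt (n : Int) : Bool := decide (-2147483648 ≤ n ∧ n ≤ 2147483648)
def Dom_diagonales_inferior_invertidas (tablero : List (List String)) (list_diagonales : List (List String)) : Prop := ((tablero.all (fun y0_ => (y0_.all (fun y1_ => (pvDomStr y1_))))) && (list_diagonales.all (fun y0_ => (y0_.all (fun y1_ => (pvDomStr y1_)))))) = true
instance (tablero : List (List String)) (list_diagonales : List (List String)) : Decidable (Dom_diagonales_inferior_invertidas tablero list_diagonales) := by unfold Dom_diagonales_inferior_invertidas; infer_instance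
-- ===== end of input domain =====

-- B replaces A's per-column diagonal-walking while loops by ONE row-major pass that scatters each
-- cell into a bucket keyed by diagonal index j - i (objective: alternative decomposition, same cost).
-- Both A and B mutate list_diagonales by appending the same diagonals in the same order; the
-- theorems below are about the returned value.

-- ===== PORT A =====
-- the inner while loop of A: walk down-right from (filas, columnas)
def pvWalkA (tablero : List (List String)) (n m filas columnas : Int) : List String :=
  if filas < n ∧ 0 ≤ columnas ∧ columnas < m then
    PySem.List.pyGetD (PySem.List.pyGetD tablero filas []) columnas "" ::
      pvWalkA tablero n m (filas + 1) (columnas + 1)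
  else []
termination_by (n - filas).toNat
decreasing_by omega

def diagonales_inferior_invertidas (tablero : List (List String)) (list_diagonales : List (List String)) : List (List String) :=
  let n : Int := (tablero.length : Int)
  let m : Int := ((PySem.List.pyGetD tablero 0 []).length : Int)
  (PySem.List.pyRange (m - 1) (-1) (-1)).foldl
    (fun acc col => acc ++ [pvWalkA tablero n m 0 col]) list_diagonales

-- ===== PORT B =====
def diagonales_inferior_invertidas_alt (tablero : List (List String)) (list_diagonales : List (List String)) : List (List String) :=
  let m : Int := ((PySem.List.pyGetD tablero 0 []).length : Int)
  let buckets : List (List String) := (PySem.List.pyRange 0 m 1).map (fun _ => ([] : List String))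
  let buckets := (PySem.List.enumerate tablero).foldl
    (fun bs p =>
      (PySem.List.pyRange p.1 m 1).foldl
        (fun bs j => bs.modify (j - p.1).toNat (fun b => b ++ [PySem.List.pyGetD p.2 j ""])) bs)
    buckets
  list_diagonales ++ buckets.reverse

-- ===== PRECONDITION & SPEC =====
-- Pre_ excludes exactly the inputs where the Python A raises IndexError: an empty board
-- (tablero[0]) or some reached row i < min(n, m) shorter than the first row.
def Pre_diagonales_inferior_invertidas (tablero : List (List String)) (list_diagonales : List (List String)) : Prop :=
  tablero ≠ [] ∧
  ∀ i, i < min tablero.length (PySem.List.pyGetD tablero 0 []).length →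
    (PySem.List.pyGetD tablero 0 []).length ≤ (tablero.getD i []).length
instance (tablero : List (List String)) (list_diagonales : List (List String)) : Decidable (Pre_diagonales_inferior_invertidas tablero list_diagonales) := by unfold Pre_diagonales_inferior_invertidas; infer_instance

def pvWitness_diagonales_inferior_invertidas : List (List String) × List (List String) :=
  ([["a", "b"], ["c", "d"]], [["z"]])

def Spec_diagonales_inferior_invertidas (tablero : List (List String)) (list_diagonales : List (List String)) (out : List (List String)) : Prop := out = diagonales_inferior_invertidas_alt tablero list_diagonales
instance (tablero : List (List String)) (list_diagonales : List (List String)) (out : List (List String)) : Decidable (Spec_diagonales_inferior_invertidas tablero list_diagonales out) := by unfold Spec_diagonales_inferior_invertidas; infer_instance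

-- ===== CLAIM (what is proved, stated in full; the proofs are below) =====
def Claim_equal_diagonales_inferior_invertidas : Prop := ∀ (tablero : List (List String)) (list_diagonales : List (List String)), Dom_diagonales_inferior_invertidas tablero list_diagonales → Pre_diagonales_inferior_invertidas tablero list_diagonales → Spec_diagonales_inferior_invertidas tablero list_diagonales (diagonales_inferior_invertidas tablero list_diagonales)

-- ===== LEMMAS AND PROOFS =====

-- cell (i, j) of the board, and the first-i-rows prefix of diagonal d (the common spec of both ports)
def pvCell (t : List (List String)) (i j : Nat) : String := (t.getD i []).getD j ""

def pvDiagP (t : List (List String)) (m d i : Nat) : List String :=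
  (List.range (min i (m - d))).map (fun r => pvCell t r (d + r))

-- A's while loop produces diagonal d's cells from row f on
lemma pvWalkA_eq (t : List (List String)) (n m d : Nat) :
    ∀ (k f : Nat), min n (m - d) - f = k →
      pvWalkA t (n : Int) (m : Int) (f : Int) ((d : Int) + (f : Int)) =
        (List.range' f k).map (fun r => pvCell t r (d + r)) := by
  intro k
  induction k with
  | zero =>
      intro f hf
      rw [pvWalkA, if_neg]
      · simp
      · omega
  | succ k ih =>
      intro f hf
      rw [pvWalkA, if_pos (by omega)]
      have h1 : ((d : Int) + (f : Int)) = ((d + f : Nat) : Int) := by push_cast; ring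
      have h2 : ((f : Int) + 1) = ((f + 1 : Nat) : Int) := by push_cast; ring
      have h3 : (((d + f : Nat) : Int) + 1) = ((d : Int) + ((f + 1 : Nat) : Int)) := by push_cast; ring
      rw [h1, h2, h3, ih (f + 1) (by omega), List.range'_succ]
      simp only [List.map_cons]
      congr 1
      rw [PySem.List.pyGetD_natCast, PySem.List.pyGetD_natCast]
      simp only [pvCell]

-- range(m-1, -1, -1)
lemma pvPyRangeDown (m : Nat) :
    PySem.List.pyRange ((m : Int) - 1) (-1) (-1) = (List.range m).map (fun k : Nat => (m : Int) - 1 - (k : Int)) := by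
  unfold PySem.List.pyRange
  rw [if_neg (by norm_num)]
  rcases Nat.eq_zero_or_pos m with hm | hm
  · subst hm; norm_num
  · rw [if_neg (by norm_num), if_pos (by omega)]
    have : (((m : Int) - 1 - -1 + - -1 - 1) / - -1).toNat = m := by
      push_cast; omega
    rw [this]
    exact List.map_congr_left (fun k _ => by ring)

-- modifying position p of a range-indexed map
lemma pvModifyMapRange {α : Type} (m p : Nat) (g : Nat → α) (f : α → α) :
    ((List.range m).map g).modify p f = (List.range m).map (fun d => if d = p then f (g d) else g d) := by
  apply List.ext_getElem
  · simp
  · intro k h1 h2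
    simp only [List.getElem_modify, List.getElem_map, List.getElem_range]
    by_cases h : p = k
    · simp [h]
    · rw [if_neg h, if_neg (show ¬ k = p from fun hk => h hk.symm)]

-- B's inner loop: scatter row p.2 = fila (row index i) over the buckets, columns a..m-1
lemma pvScatterB (m i : Nat) (x : Int → String) :
    ∀ (k a : Nat) (g : Nat → List String), i ≤ a → m - a = k →
      (PySem.List.pyRange (a : Int) (m : Int) 1).foldl
          (fun bs j => bs.modify (j - (i : Int)).toNat (fun b => b ++ [x j])) ((List.range m).map g)
        = (List.range m).map (fun d => if a ≤ d + i ∧ d + i < m then g d ++ [x ((d + i : Nat) : Int)] else g d) := by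
  intro k
  induction k with
  | zero =>
      intro a g hia hk
      have hrange : PySem.List.pyRange (a : Int) (m : Int) 1 = [] := by
        rw [PySem.List.pyRange_one]
        have : ((m : Int) - (a : Int)).toNat = 0 := by omega
        rw [this]; simp
      rw [hrange]
      simp only [List.foldl_nil]
      apply List.map_congr_left
      intro d hd
      rw [if_neg (by simp at hd; omega)]
  | succ k ih =>
      intro a g hia hk
      have ham : a < m := by omega
      rw [PySem.List.pyRange_one_cons (by omega), List.foldl_cons]
      have htn : (((a : Int) - (i : Int)).toNat) = a - i := by omega
      rw [htn, pvModifyMapRange]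
      have hcast : ((a : Int) + 1) = ((a + 1 : Nat) : Int) := by push_cast; ring
      rw [hcast, ih (a + 1) _ (by omega) (by omega)]
      apply List.map_congr_left
      intro d hd
      simp only [List.mem_range] at hd
      by_cases hda : d + i = a
      · have h1 : ¬(a + 1 ≤ d + i ∧ d + i < m) := by omega
        rw [if_neg h1, if_pos (show d = a - i by omega), if_pos (show a ≤ d + i ∧ d + i < m by omega)]
        have hxc : ((d + i : Nat) : Int) = (a : Int) := by rw [hda]
        rw [hxc]
      · by_cases hcond : a + 1 ≤ d + i ∧ d + i < m
        · rw [if_pos hcond, if_neg (show ¬ d = a - i by omega), if_pos (show a ≤ d + i ∧ d + i < m by omega)]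
        · rw [if_neg hcond, if_neg (show ¬ d = a - i by omega), if_neg (show ¬(a ≤ d + i ∧ d + i < m) by omega)]

-- B's outer loop: rows i, i+1, … extend each diagonal prefix to the full diagonal
lemma pvOuterB (t : List (List String)) (m : Nat) :
    ∀ (rows : List (List String)) (i : Nat), rows = t.drop i →
      (PySem.List.enumerate rows (i : Int)).foldl
          (fun bs p =>
            (PySem.List.pyRange p.1 (m : Int) 1).foldl
              (fun bs j => bs.modify (j - p.1).toNat (fun b => b ++ [PySem.List.pyGetD p.2 j ""])) bs)
          ((List.range m).map (fun d => pvDiagP t m d i))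
        = (List.range m).map (fun d => pvDiagP t m d (i + rows.length)) := by
  intro rows
  induction rows with
  | nil => intro i _; simp
  | cons fila rest ih =>
      intro i hrows
      have hfila : t[i]? = some fila := by
        have h : (List.drop i t)[0]? = t[i + 0]? := List.getElem?_drop
        rw [← hrows] at h
        simpa using h.symm
      rw [PySem.List.enumerate_cons, List.foldl_cons]
      rw [pvScatterB m i (fun j => PySem.List.pyGetD fila j "") (m - i) i
            (fun d => pvDiagP t m d i) (le_refl i) rfl]
      have hstep : (List.range m).map
            (fun d => if i ≤ d + i ∧ d + i < m then pvDiagP t m d i ++ [PySem.List.pyGetD fila ((d + i : Nat) : Int) ""] else pvDiagP t m d i)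
          = (List.range m).map (fun d => pvDiagP t m d (i + 1)) := by
        apply List.map_congr_left
        intro d hd
        rw [PySem.List.pyGetD_natCast]
        by_cases hc : d + i < m
        · rw [if_pos ⟨by omega, hc⟩]
          unfold pvDiagP
          have h1 : min i (m - d) = i := by omega
          have h2 : min (i + 1) (m - d) = i + 1 := by omega
          rw [h1, h2, List.range_succ, List.map_append]
          simp [pvCell, List.getD, hfila, Nat.add_comm d i]
        · rw [if_neg (by omega)]
          unfold pvDiagP
          have : min i (m - d) = min (i + 1) (m - d) := by omega
          rw [this]
      rw [hstep]
      have hrest : rest = t.drop (i + 1) := by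
        have := congrArg List.tail hrows
        simpa [List.tail_drop] using this
      have hcast : ((i : Int) + 1) = ((i + 1 : Nat) : Int) := by push_cast; ring
      rw [hcast, ih (i + 1) hrest]
      congr 1
      funext d
      congr 1
      simp [List.length_cons]
      omega

-- descending map over range m is the reverse of the ascending one
lemma pvMapRangeRev {α : Type} (m : Nat) (F : Nat → α) :
    (List.range m).map (fun k => F (m - 1 - k)) = ((List.range m).map F).reverse := by
  apply List.ext_getElem
  · simp
  · intro k h1 h2
    simp only [List.getElem_map, List.getElem_range, List.getElem_reverse]
    simp only [List.length_map, List.length_range] at h1 h2 ⊢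

-- ===== VERDICT (by name: the statement is the Claim_ definition above) =====
theorem diagonales_inferior_invertidas_spec : Claim_equal_diagonales_inferior_invertidas := by
  intro t ld _ _
  unfold Spec_diagonales_inferior_invertidas
  simp only [diagonales_inferior_invertidas, diagonales_inferior_invertidas_alt]
  set n : Nat := t.length with hn
  set m : Nat := (PySem.List.pyGetD t 0 []).length with hm
  -- A side
  rw [pvPyRangeDown m, PySem.List.foldl_append_singleton_eq_map, List.map_map]
  -- B side: initial buckets are empty diagonal prefixes
  have hinit : (PySem.List.pyRange 0 (m : Int) 1).map (fun _ => ([] : List String))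
      = (List.range m).map (fun d => pvDiagP t m d 0) := by
    rw [PySem.List.pyRange_one]
    have : ((m : Int) - 0).toNat = m := by omega
    rw [this, List.map_map]
    exact List.map_congr_left (fun d _ => by simp [pvDiagP])
  rw [hinit]
  have henum : PySem.List.enumerate t = PySem.List.enumerate (t.drop 0) ((0 : Nat) : Int) := by simp
  rw [henum, pvOuterB t m (t.drop 0) 0 rfl]
  simp only [List.drop_zero, Nat.zero_add, ← hn]
  congr 1
  rw [← pvMapRangeRev m (fun d => pvDiagP t m d n)]
  apply List.map_congr_left
  intro k hk
  simp only [List.mem_range] at hk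
  simp only [Function.comp_apply]
  have hcol : (m : Int) - 1 - (k : Int) = ((m - 1 - k : Nat) : Int) := by omega
  have h0 : (0 : Int) = ((0 : Nat) : Int) := rfl
  have hd0 : ((m - 1 - k : Nat) : Int) = ((m - 1 - k : Nat) : Int) + ((0 : Nat) : Int) := by simp
  rw [hcol, h0, hd0, pvWalkA_eq t n m (m - 1 - k) (min n (m - (m - 1 - k))) 0 (by omega)]
  unfold pvDiagP
  rw [List.range_eq_range']
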